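-- pv_equiv track=rewrite | github.com/Mohieddining/lab1_template | data/test2.py | lines_via_stop
-- ===== SOURCE A (Python) =====
-- def lines_via_stop(linedict, stop):
--
--     lines_v_stops = []
--     for key, value in linedict.items():
--         for station in value:
--             if station == stop:
--                 lines_v_stops.append(key)
--
--     sorted_lines = sorted(lines_v_stops, key=lambda x: int(x))
--     return sorted_lines
-- ===== SOURCE B (Python) =====
-- def lines_via_stop(linedict, stop):
--     # Count matches per line, sort only the distinct matching line keys numerically,
--     # then emit each key repeated by its count.
--     counts = {}
--     for key, stations in linedict.items():
--         n = 0
--         for station in stations: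
--             if station == stop:
--                 n += 1
--         if n > 0:
--             counts[key] = n
--
--     result = []
--     for key in sorted(counts, key=lambda x: int(x)):
--         result += [key] * counts[key]
--     return result
-- ===== Notes on version B (the rewrite author's own statement) =====
-- stated objective: alternative
-- what changed: B counts matches per key into a dict in one pass, sorts only the distinct matching keys numerically, and emits each key repeated by its count, instead of collecting every match into a multiset and sorting the whole multiset at the end.
import Mathlib
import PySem

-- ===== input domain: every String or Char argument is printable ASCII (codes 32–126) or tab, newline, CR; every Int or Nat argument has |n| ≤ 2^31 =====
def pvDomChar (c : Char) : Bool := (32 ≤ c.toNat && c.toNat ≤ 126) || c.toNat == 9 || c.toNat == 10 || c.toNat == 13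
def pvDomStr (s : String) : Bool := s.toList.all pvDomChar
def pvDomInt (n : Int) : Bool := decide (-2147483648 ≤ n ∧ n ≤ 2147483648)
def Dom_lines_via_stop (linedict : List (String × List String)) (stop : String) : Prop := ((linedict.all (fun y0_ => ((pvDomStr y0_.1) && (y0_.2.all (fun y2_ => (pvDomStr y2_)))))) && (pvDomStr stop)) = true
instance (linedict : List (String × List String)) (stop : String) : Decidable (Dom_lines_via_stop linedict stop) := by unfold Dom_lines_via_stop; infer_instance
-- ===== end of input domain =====

-- B counts matches per key into a dict, sorts only the distinct matching keys numerically and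
-- emits each key repeated by its count, instead of collecting all matches and sorting the multiset.

-- Python's int(x) for the sort key; total form: under Pre_ every key that gets sorted parses
-- (pvIntLike holds), so the default 0 is never reached.
def pvKey (s : String) : Int := (PySem.Int.ofStr? s).getD 0

-- ===== PORT A =====
def lines_via_stop (linedict : List (String × List String)) (stop : String) : List String :=
  let lines_v_stops := linedict.foldl
    (fun acc kv => kv.2.foldl
      (fun acc2 station => if station == stop then acc2 ++ [kv.1] else acc2) acc) []
  PySem.List.sorted lines_v_stops (fun x => pvKey x) false

-- ===== PORT B =====
def lines_via_stop_alt (linedict : List (String × List String)) (stop : String) : List String :=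
  let counts : PySem.Dict String Int := linedict.foldl
    (fun d kv =>
      let n := kv.2.foldl (fun n station => if station == stop then n + 1 else n) (0 : Int)
      if 0 < n then d.insert kv.1 n else d)
    PySem.Dict.empty
  let skeys := PySem.List.sorted counts.keys (fun x => pvKey x) false
  skeys.foldl (fun result k => result ++ List.replicate (counts.getD k 0).toNat k) []

-- closed-form grammar of Python's int(s): optional surrounding whitespace, an optional sign,
-- then digits with single underscores allowed only between digits (exactly where int() returns)
def pvIsIntSpace (c : Char) : Bool :=
  c == ' ' || c == '\t' || c == '\n' || c == '\r' || c == '\x0b' || c == '\x0c'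
def pvDigitsTail : List Char → Bool
  | [] => true
  | '_' :: c :: cs => c.isDigit && pvDigitsTail cs
  | '_' :: [] => false
  | c :: cs => c.isDigit && pvDigitsTail cs
def pvDigitGroup : List Char → Bool
  | [] => false
  | c :: cs => c.isDigit && pvDigitsTail cs
def pvIntLike (s : String) : Bool :=
  match ((s.toList.dropWhile pvIsIntSpace).reverse.dropWhile pvIsIntSpace).reverse with
  | '-' :: ds => pvDigitGroup ds
  | '+' :: ds => pvDigitGroup ds
  | ds => pvDigitGroup ds

-- ===== PRECONDITION & SPEC =====
-- Pre_ excludes (a) association lists with duplicate keys, which do not represent a Python dict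
-- (A's argument is a dict, whose keys are unique), and (b) inputs where some key whose station
-- list contains `stop` is not int-parsable: there Python A (and B) raise ValueError from int().
def Pre_lines_via_stop (linedict : List (String × List String)) (stop : String) : Prop :=
  (linedict.map Prod.fst).Nodup ∧
  ∀ p ∈ linedict, stop ∈ p.2 → pvIntLike p.1 = true
instance (linedict : List (String × List String)) (stop : String) : Decidable (Pre_lines_via_stop linedict stop) := by unfold Pre_lines_via_stop; infer_instance

def pvWitness_lines_via_stop : (List (String × List String)) × String :=
  ([("1", ["a"]), ("10", ["a", "b"]), ("2", ["a"])], "a")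

def Spec_lines_via_stop (linedict : List (String × List String)) (stop : String) (out : List String) : Prop := out = lines_via_stop_alt linedict stop
instance (linedict : List (String × List String)) (stop : String) (out : List String) : Decidable (Spec_lines_via_stop linedict stop out) := by unfold Spec_lines_via_stop; infer_instance

-- ===== CLAIM (what is proved, stated in full; the proofs are below) =====
def Claim_equal_lines_via_stop : Prop := ∀ (linedict : List (String × List String)) (stop : String), Dom_lines_via_stop linedict stop → Pre_lines_via_stop linedict stop → Spec_lines_via_stop linedict stop (lines_via_stop linedict stop)

-- ===== LEMMAS AND PROOFS =====

-- strict-before tests used by the stable insertion sort, on keys and on (key, count) pairs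
def pvBk (a b : String) : Bool := decide (pvKey a < pvKey b)
def pvBp (a b : String × Int) : Bool := decide (pvKey a.1 < pvKey b.1)

-- a (key, count) list expanded to the corresponding multiset of keys
def pvExpand (ps : List (String × Int)) : List String :=
  ps.flatMap (fun p => List.replicate p.2.toNat p.1)

-- per-key match counts of the whole dict, in dict order
def pvAllPairs (linedict : List (String × List String)) (stop : String) : List (String × Int) :=
  linedict.map (fun p => (p.1, ((p.2.count stop : Nat) : Int)))

-- B's counts dict as a named value
def pvCounts (linedict : List (String × List String)) (stop : String) : PySem.Dict String Int :=
  linedict.foldl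
    (fun d kv =>
      let n := kv.2.foldl (fun n station => if station == stop then n + 1 else n) (0 : Int)
      if 0 < n then d.insert kv.1 n else d)
    PySem.Dict.empty

lemma pvExpand_append (l r : List (String × Int)) :
    pvExpand (l ++ r) = pvExpand l ++ pvExpand r := by
  simp [pvExpand, List.flatMap_append]

lemma pvMem_expand {y : String} {qs : List (String × Int)} (h : y ∈ pvExpand qs) :
    ∃ p ∈ qs, y = p.1 := by
  simp only [pvExpand, List.mem_flatMap] at h
  obtain ⟨p, hp, hy⟩ := h
  exact ⟨p, hp, List.eq_of_mem_replicate hy⟩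

lemma pvIns_skip (k : String) (l r : List String) (hl : ∀ y ∈ l, pvBk k y = false) :
    PySem.List.insertBy pvBk k (l ++ r) = l ++ PySem.List.insertBy pvBk k r := by
  induction l with
  | nil => simp
  | cons y ys ih =>
      have hy := hl y (by simp)
      simp only [List.cons_append, PySem.List.insertBy, hy]
      simp only [Bool.false_eq_true, if_false, List.cons.injEq, true_and]
      exact ih (fun z hz => hl z (by simp [hz]))

lemma pvIns_front (k : String) (r : List String)
    (hr : ∀ y, r.head? = some y → pvBk k y = true) :
    PySem.List.insertBy pvBk k r = k :: r := by
  cases r with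
  | nil => rfl
  | cons y ys => simp [PySem.List.insertBy, hr y rfl]

lemma pvRepIns (c : Nat) (k : String) (l r : List String)
    (hl : ∀ y ∈ l, pvBk k y = false)
    (hr : ∀ y, r.head? = some y → pvBk k y = true) :
    (List.replicate c k).foldl (fun a x => PySem.List.insertBy pvBk x a) (l ++ r)
      = l ++ List.replicate c k ++ r := by
  induction c generalizing l with
  | zero => simp
  | succ c ih =>
      rw [List.replicate_succ, List.foldl_cons]
      rw [pvIns_skip k l r hl, pvIns_front k r hr]
      have := ih (l ++ [k]) (by
        intro y hy
        rcases List.mem_append.mp hy with h | h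
        · exact hl y h
        · simp only [List.mem_singleton] at h
          subst h
          simp [pvBk])
      simpa [List.append_assoc, List.replicate_succ'] using this

lemma pvSplitP (x : String × Int) (qs : List (String × Int)) :
    ∃ l r, qs = l ++ r ∧ PySem.List.insertBy pvBp x qs = l ++ x :: r ∧
      (∀ p ∈ l, pvBp x p = false) ∧ (∀ p, r.head? = some p → pvBp x p = true) := by
  induction qs with
  | nil => exact ⟨[], [], rfl, rfl, by simp, by simp⟩
  | cons q qs ih =>
      by_cases hq : pvBp x q = true
      · exact ⟨[], q :: qs, rfl, by simp [PySem.List.insertBy, hq], by simp, by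
          intro p hp; simp only [List.head?_cons, Option.some.injEq] at hp; subst hp; exact hq⟩
      · obtain ⟨l, r, h1, h2, h3, h4⟩ := ih
        refine ⟨q :: l, r, by simp [h1], ?_, ?_, h4⟩
        · simp [PySem.List.insertBy, hq, h2]
        · intro p hp
          rcases List.mem_cons.mp hp with h | h
          · subst h
            simp only [Bool.not_eq_true] at hq
            exact hq
          · exact h3 p h

lemma pvBlockIns (c : Int) (k : String) (qs : List (String × Int))
    (hpos : ∀ p ∈ qs, 0 < p.2) :
    (List.replicate c.toNat k).foldl (fun a x => PySem.List.insertBy pvBk x a) (pvExpand qs)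
      = pvExpand (PySem.List.insertBy pvBp (k, c) qs) := by
  obtain ⟨l, r, h1, h2, h3, h4⟩ := pvSplitP (k, c) qs
  subst h1
  rw [h2, pvExpand_append, pvExpand_append]
  have hl : ∀ y ∈ pvExpand l, pvBk k y = false := by
    intro y hy
    obtain ⟨p, hp, rfl⟩ := pvMem_expand hy
    exact h3 p hp
  have hr : ∀ y, (pvExpand r).head? = some y → pvBk k y = true := by
    intro y hy
    cases r with
    | nil => simp [pvExpand] at hy
    | cons p r' =>
        have hp2 : 0 < p.2 := hpos p (by simp)
        have : pvExpand (p :: r') = p.1 :: (List.replicate (p.2.toNat - 1) p.1 ++ pvExpand r') := by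
          have : p.2.toNat = (p.2.toNat - 1) + 1 := by omega
          simp only [pvExpand, List.flatMap_cons]
          rw [this, List.replicate_succ]
          simp [pvExpand, List.flatMap_append]
        rw [this] at hy
        simp only [List.head?_cons, Option.some.injEq] at hy
        subst hy
        exact h4 p rfl
  have := pvRepIns c.toNat k (pvExpand l) (pvExpand r) hl hr
  rw [this]
  simp [pvExpand, List.append_assoc]

lemma pvFoldG (ps : List (String × Int)) (qs : List (String × Int))
    (hps : ∀ p ∈ ps, 0 < p.2) (hqs : ∀ p ∈ qs, 0 < p.2) :
    (pvExpand ps).foldl (fun a x => PySem.List.insertBy pvBk x a) (pvExpand qs)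
      = pvExpand (ps.foldl (fun a p => PySem.List.insertBy pvBp p a) qs) := by
  induction ps generalizing qs with
  | nil => simp [pvExpand]
  | cons p ps ih =>
      have hp : 0 < p.2 := hps p (by simp)
      have hexp : pvExpand (p :: ps) = List.replicate p.2.toNat p.1 ++ pvExpand ps := by
        simp [pvExpand, List.flatMap_append]
      rw [hexp, List.foldl_append]
      rw [pvBlockIns p.2 p.1 qs hqs]
      rw [List.foldl_cons]
      apply ih
      · intro x hx
        exact hps x (by simp [hx])
      · intro x hx
        rcases (PySem.List.mem_insertBy pvBp (p.1, p.2) x qs).mp hx with h | h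
        · subst h; exact hp
        · exact hqs x h

lemma pvSorted_expand (ps : List (String × Int)) (hpos : ∀ p ∈ ps, 0 < p.2) :
    PySem.List.sorted (pvExpand ps) (fun x => pvKey x) false
      = pvExpand (PySem.List.sorted ps (fun p => pvKey p.1) false) := by
  rw [PySem.List.sorted_eq_foldl_insertBy, PySem.List.sorted_eq_foldl_insertBy]
  have := pvFoldG ps [] hpos (by simp)
  simpa [pvExpand, pvBk, pvBp] using this

lemma pvExpand_filter (ps : List (String × Int)) :
    pvExpand (ps.filter (fun p => decide (0 < p.2))) = pvExpand ps := by
  induction ps with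
  | nil => rfl
  | cons p ps ih =>
      by_cases hp : 0 < p.2
      · have h1 : (p :: ps).filter (fun p => decide (0 < p.2))
            = p :: ps.filter (fun p => decide (0 < p.2)) := by
          simp [hp]
        rw [h1]
        simp only [pvExpand, List.flatMap_cons]
        exact congrArg (List.replicate p.2.toNat p.1 ++ ·) ih
      · have h1 : (p :: ps).filter (fun p => decide (0 < p.2))
            = ps.filter (fun p => decide (0 < p.2)) := by
          simp [hp]
        have h0 : p.2.toNat = 0 := by omega
        have h2 : pvExpand (p :: ps) = pvExpand ps := by
          simp [pvExpand, h0]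
        rw [h1, h2]
        exact ih

lemma pvA_eq (linedict : List (String × List String)) (stop : String) :
    lines_via_stop linedict stop
      = PySem.List.sorted (pvExpand (pvAllPairs linedict stop)) (fun x => pvKey x) false := by
  have h0 : lines_via_stop linedict stop
      = PySem.List.sorted (linedict.foldl
          (fun acc kv => kv.2.foldl
            (fun acc2 station => if station == stop then acc2 ++ [kv.1] else acc2) acc) [])
          (fun x => pvKey x) false := rfl
  rw [h0]
  congr 1
  have hstep : ∀ (acc : List String) (kv : String × List String),
      kv.2.foldl (fun a station => if station == stop then a ++ [kv.1] else a) acc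
        = acc ++ List.replicate (kv.2.count stop) kv.1 := by
    intro acc kv
    rw [PySem.List.foldl_append_if (fun station => station == stop) (fun _ => kv.1) kv.2 acc]
    rw [List.filter_beq stop, List.map_replicate]
  calc linedict.foldl
        (fun acc kv => kv.2.foldl
          (fun acc2 station => if station == stop then acc2 ++ [kv.1] else acc2) acc) []
      = linedict.foldl (fun acc kv => acc ++ List.replicate (kv.2.count stop) kv.1) [] := by
        exact PySem.List.foldl_congr_mem linedict _ _ [] (fun acc kv _ => hstep acc kv)
    _ = List.flatMap (fun kv => List.replicate (kv.2.count stop) kv.1) linedict := by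
        rw [PySem.List.foldl_append_eq_flatMap]; simp
    _ = pvExpand (pvAllPairs linedict stop) := by
        simp [pvExpand, pvAllPairs, List.flatMap_map]

lemma pvFind_nodup (l : List (String × Int)) (p : String × Int)
    (hp : p ∈ l) (hnd : (l.map Prod.fst).Nodup) :
    l.find? (fun q => q.1 == p.1) = some p := by
  induction l with
  | nil => simp at hp
  | cons q l ih =>
      rcases List.mem_cons.mp hp with h | h
      · subst h; simp
      · have hq : (q.1 == p.1) = false := by
          have hnotin : q.1 ∉ l.map Prod.fst := (List.nodup_cons.mp (by simpa using hnd)).1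
          have : p.1 ∈ l.map Prod.fst := List.mem_map.mpr ⟨p, h, rfl⟩
          simp only [beq_eq_false_iff_ne, ne_eq]
          intro hEq
          exact hnotin (hEq ▸ this)
        rw [List.find?_cons, hq]
        exact ih h (List.nodup_cons.mp (by simpa using hnd)).2

lemma pvCounts_step (ld : List (String × List String)) (kv : String × List String)
    (stop : String) :
    pvCounts (ld ++ [kv]) stop =
      (let n := kv.2.foldl (fun n station => if station == stop then n + 1 else n) (0 : Int)
       if 0 < n then (pvCounts ld stop).insert kv.1 n else pvCounts ld stop) := by
  simp [pvCounts, List.foldl_append]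

lemma pvInnerCount (kv : String × List String) (stop : String) :
    kv.2.foldl (fun n station => if station == stop then n + 1 else n) (0 : Int)
      = ((kv.2.count stop : Nat) : Int) := by
  rw [PySem.List.foldl_count_if (fun station => station == stop) kv.2 0]
  simp [List.count]

lemma pvCounts_items (linedict : List (String × List String)) (stop : String)
    (hnd : (linedict.map Prod.fst).Nodup) :
    (pvCounts linedict stop).items
      = (pvAllPairs linedict stop).filter (fun p => decide (0 < p.2)) := by
  induction linedict using List.reverseRecOn with
  | nil => rfl
  | append_singleton ld kv ih =>
      have hnd' : (ld.map Prod.fst).Nodup := by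
        refine List.Nodup.sublist ?_ hnd
        exact List.Sublist.map Prod.fst (by simp)
      have hfresh : kv.1 ∉ ld.map Prod.fst := by
        simp only [List.map_append, List.map_cons, List.map_nil] at hnd
        have hd := (List.nodup_append.mp hnd).2.2
        intro hmem
        exact hd kv.1 hmem kv.1 (by simp) rfl
      have hitems := ih hnd'
      have hcontains : (pvCounts ld stop).contains kv.1 = false := by
        simp only [PySem.Dict.contains, hitems, List.any_eq_false]
        intro q hq
        have hq1 : q.1 ∈ ld.map Prod.fst := by
          have : q ∈ pvAllPairs ld stop := List.mem_of_mem_filter hq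
          simp only [pvAllPairs, List.mem_map] at this
          obtain ⟨r, hr, hrq⟩ := this
          exact List.mem_map.mpr ⟨r, hr, by rw [← hrq]⟩
        intro hEq
        have he := eq_of_beq hEq
        rw [he] at hq1
        exact absurd hq1 hfresh
      rw [pvCounts_step]
      simp only [pvInnerCount kv stop]
      by_cases hn : 0 < ((kv.2.count stop : Nat) : Int)
      · rw [if_pos hn]
        have hins : ((pvCounts ld stop).insert kv.1 ((kv.2.count stop : Nat) : Int)).items
            = (pvCounts ld stop).items ++ [(kv.1, ((kv.2.count stop : Nat) : Int))] := by
          simp [PySem.Dict.insert, hcontains]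
        rw [hins, hitems]
        have hone : List.filter (fun p => decide (0 < p.2))
            [(kv.1, ((kv.2.count stop : Nat) : Int))]
            = [(kv.1, ((kv.2.count stop : Nat) : Int))] := by
          simp only [List.filter_cons, List.filter_nil]
          rw [if_pos (decide_eq_true hn)]
        simp only [pvAllPairs, List.map_append, List.map_cons, List.map_nil,
          List.filter_append, hone]
      · rw [if_neg hn]
        rw [hitems]
        simp only [pvAllPairs, List.map_append, List.map_cons, List.map_nil, List.filter_append]
        have hnil : List.filter (fun p => decide (0 < p.2))
            [(kv.1, ((kv.2.count stop : Nat) : Int))] = [] := by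
          simp only [List.filter_cons, List.filter_nil]
          rw [if_neg (fun h => hn (of_decide_eq_true h))]
        rw [hnil, List.append_nil]

lemma pvLookup (linedict : List (String × List String)) (stop : String)
    (hnd : (linedict.map Prod.fst).Nodup) (p : String × Int)
    (hp : p ∈ (pvCounts linedict stop).items) :
    (pvCounts linedict stop).getD p.1 0 = p.2 := by
  have hndi : ((pvCounts linedict stop).items.map Prod.fst).Nodup := by
    rw [pvCounts_items linedict stop hnd]
    refine List.Nodup.sublist (List.Sublist.map Prod.fst List.filter_sublist) ?_
    simpa [pvAllPairs, List.map_map, Function.comp_def] using hnd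
  have := pvFind_nodup _ p hp hndi
  simp [PySem.Dict.getD, PySem.Dict.get?, this]

lemma pvInsMap (p : String × Int) (qs : List (String × Int)) :
    PySem.List.insertBy pvBk p.1 (qs.map Prod.fst)
      = (PySem.List.insertBy pvBp p qs).map Prod.fst := by
  induction qs with
  | nil => rfl
  | cons q qs ih =>
      by_cases h : pvBp p q = true
      · have : pvBk p.1 q.1 = true := h
        simp [PySem.List.insertBy, h, this]
      · have h2 : pvBk p.1 q.1 = false := by simpa [pvBk, pvBp] using h
        simp [PySem.List.insertBy, h2, eq_false_of_ne_true h, ih]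

lemma pvSorted_map_fst (l : List (String × Int)) :
    PySem.List.sorted (l.map Prod.fst) (fun x => pvKey x) false
      = (PySem.List.sorted l (fun p => pvKey p.1) false).map Prod.fst := by
  rw [PySem.List.sorted_eq_foldl_insertBy, PySem.List.sorted_eq_foldl_insertBy]
  suffices h : ∀ (acc : List (String × Int)),
      (l.map Prod.fst).foldl (fun a x => PySem.List.insertBy pvBk x a) (acc.map Prod.fst)
        = (l.foldl (fun a p => PySem.List.insertBy pvBp p a) acc).map Prod.fst by
    simpa [pvBk, pvBp] using h []
  induction l with
  | nil => intro acc; rfl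
  | cons p ps ih =>
      intro acc
      simp only [List.map_cons, List.foldl_cons]
      rw [pvInsMap p acc]
      exact ih (PySem.List.insertBy pvBp p acc)

lemma pvB_eq (linedict : List (String × List String)) (stop : String)
    (hnd : (linedict.map Prod.fst).Nodup) :
    lines_via_stop_alt linedict stop
      = pvExpand (PySem.List.sorted
          ((pvAllPairs linedict stop).filter (fun p => decide (0 < p.2)))
          (fun p => pvKey p.1) false) := by
  have h0 : lines_via_stop_alt linedict stop
      = (PySem.List.sorted (pvCounts linedict stop).keys (fun x => pvKey x) false).foldl
          (fun result k => result ++ List.replicate ((pvCounts linedict stop).getD k 0).toNat k)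
          [] := rfl
  rw [h0]
  have hkeys : (pvCounts linedict stop).keys = (pvCounts linedict stop).items.map Prod.fst := rfl
  rw [hkeys, pvSorted_map_fst]
  rw [PySem.List.foldl_append_eq_flatMap]
  rw [List.nil_append, List.flatMap_map]
  have hmem : ∀ p ∈ PySem.List.sorted (pvCounts linedict stop).items
      (fun p => pvKey p.1) false,
      List.replicate ((pvCounts linedict stop).getD p.1 0).toNat p.1
        = List.replicate p.2.toNat p.1 := by
    intro p hp
    rw [pvLookup linedict stop hnd p
      ((PySem.List.mem_sorted _ _ _ p).mp hp)]
  calc List.flatMap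
        (fun p => List.replicate ((pvCounts linedict stop).getD p.1 0).toNat p.1)
        (PySem.List.sorted (pvCounts linedict stop).items (fun p => pvKey p.1) false)
      = List.flatMap (fun p => List.replicate p.2.toNat p.1)
          (PySem.List.sorted (pvCounts linedict stop).items (fun p => pvKey p.1) false) := by
        rw [List.flatMap_def, List.flatMap_def, List.map_congr_left hmem]
    _ = pvExpand (PySem.List.sorted
          ((pvAllPairs linedict stop).filter (fun p => decide (0 < p.2)))
          (fun p => pvKey p.1) false) := by
        rw [pvExpand, pvCounts_items linedict stop hnd]

-- ===== VERDICT (by name: the statement is the Claim_ definition above) =====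
theorem lines_via_stop_spec : Claim_equal_lines_via_stop := by
  intro linedict stop _ hpre
  unfold Spec_lines_via_stop
  obtain ⟨hnd, _⟩ := hpre
  rw [pvA_eq, pvB_eq linedict stop hnd]
  rw [← pvExpand_filter (pvAllPairs linedict stop)]
  exact pvSorted_expand _ (fun p hp => by simpa using (List.of_mem_filter hp))
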